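-- pv_equiv track=rewrite | github.com/danny-ell77/digestly-be | services/processor.py | _find_stop_word_boundary
-- ===== SOURCE A (Python) =====
-- def _find_stop_word_boundary(text: str, max_chars: int) -> int:
--     """
--     Find a natural break point in text based on stop words and punctuation.
--
--     Args:
--         text (str): The text to find a break point in
--         max_chars (int): Maximum number of characters to consider
--
--     Returns:
--         int: Index of the break point
--     """
--     if not text or max_chars <= 0:
--         return 0
--     if len(text) <= max_chars:
--         return len(text)
--
--     stop_words = [".\n", "!\n", "?\n", ". ", "! ", "? ", "\n\n", "; "]
--
--     search_text = text[:max_chars]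
--
--     best_pos = -1
--     best_stop_len = 0
--
--     for stop_word in stop_words:
--         pos = search_text.rfind(stop_word)
--         if pos > best_pos:
--             best_pos = pos
--             best_stop_len = len(stop_word)
--
--     if best_pos != -1:
--         return best_pos + best_stop_len
--
--     last_space = search_text.rfind(" ")
--     if last_space != -1:
--         return last_space + 1
--
--     return max_chars
-- ===== SOURCE B (Python) =====
-- def _find_stop_word_boundary(text: str, max_chars: int) -> int:
--     """Single right-to-left scan instead of eight separate rfind passes."""
--     if not text or max_chars <= 0:
--         return 0
--     if len(text) <= max_chars:
--         return len(text)
--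
--     search_text = text[:max_chars]
--     stops = (".\n", "!\n", "?\n", ". ", "! ", "? ", "\n\n", "; ")
--
--     for i in range(len(search_text) - 2, -1, -1):
--         if search_text[i:i + 2] in stops:
--             return i + 2
--
--     for i in range(len(search_text) - 1, -1, -1):
--         if search_text[i] == " ":
--             return i + 1
--
--     return max_chars
-- ===== Notes on version B (the rewrite author's own statement) =====
-- stated objective: alternative
-- what changed: Replaces the eight independent rfind passes with max-tracking by one right-to-left scan over two-character windows that returns at the first stop-word match, plus a single reverse scan for the fallback space.
import Mathlib
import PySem

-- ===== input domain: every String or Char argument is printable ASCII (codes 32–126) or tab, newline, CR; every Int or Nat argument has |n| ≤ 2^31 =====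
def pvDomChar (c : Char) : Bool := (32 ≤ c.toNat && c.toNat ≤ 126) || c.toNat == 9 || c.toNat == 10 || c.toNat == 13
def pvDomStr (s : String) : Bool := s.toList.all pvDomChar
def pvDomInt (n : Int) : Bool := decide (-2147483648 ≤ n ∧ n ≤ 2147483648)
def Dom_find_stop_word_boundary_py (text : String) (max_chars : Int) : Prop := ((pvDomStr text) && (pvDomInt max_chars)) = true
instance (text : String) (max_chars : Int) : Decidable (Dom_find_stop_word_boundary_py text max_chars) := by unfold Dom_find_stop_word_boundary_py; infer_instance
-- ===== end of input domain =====

-- B replaces A's eight separate rfind passes (with max-tracking) by one right-to-left scan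
-- over two-character windows plus a single reverse scan for the fallback space (objective: alternative).


-- ===== PORT A =====
def find_stop_word_boundary_py (text : String) (max_chars : Int) : Int :=
  if text = "" ∨ max_chars ≤ 0 then 0
  else if PySem.Str.len text ≤ max_chars then PySem.Str.len text
  else
    let stop_words : List String := [".\n", "!\n", "?\n", ". ", "! ", "? ", "\n\n", "; "]
    let search_text := PySem.Str.slice text none (some max_chars)
    let best := stop_words.foldl (fun (b : Int × Int) stop_word =>
      let pos := PySem.Str.rfind search_text stop_word
      if pos > b.1 then (pos, PySem.Str.len stop_word) else b) (-1, 0)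
    if best.1 ≠ -1 then best.1 + best.2
    else
      let last_space := PySem.Str.rfind search_text " "
      if last_space ≠ -1 then last_space + 1
      else max_chars

-- ===== PORT B =====
-- the tuple of stop words from Source B, as lists of chars
def pvStops : List (List Char) :=
  [".\n".toList, "!\n".toList, "?\n".toList, ". ".toList, "! ".toList, "? ".toList, "\n\n".toList, "; ".toList]

-- `for i in range(len(st)-2, -1, -1): if st[i:i+2] in stops: return i+2`; fuel f means indices f-1 … 0 remain
def pvScanStop (st : List Char) : Nat → Option Int
  | 0 => none
  | k+1 => if pvStops.contains (PySem.List.slice st (some (k : Int)) (some ((k : Int) + 2))) then some ((k : Int) + 2)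
           else pvScanStop st k

-- `for i in range(len(st)-1, -1, -1): if st[i] == " ": return i+1`
def pvScanSpace (st : List Char) : Nat → Option Int
  | 0 => none
  | k+1 => if PySem.List.pyGet? st (k : Int) == some ' ' then some ((k : Int) + 1)
           else pvScanSpace st k

def find_stop_word_boundary_py_alt (text : String) (max_chars : Int) : Int :=
  if text = "" ∨ max_chars ≤ 0 then 0
  else if PySem.Str.len text ≤ max_chars then PySem.Str.len text
  else
    let st := (PySem.Str.slice text none (some max_chars)).toList
    match pvScanStop st (st.length - 1) with
    | some r => r
    | none =>
      match pvScanSpace st st.length with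
      | some r => r
      | none => max_chars

-- ===== PRECONDITION & SPEC =====
def Spec_find_stop_word_boundary_py (text : String) (max_chars : Int) (out : Int) : Prop := out = find_stop_word_boundary_py_alt text max_chars
instance (text : String) (max_chars : Int) (out : Int) : Decidable (Spec_find_stop_word_boundary_py text max_chars out) := by unfold Spec_find_stop_word_boundary_py; infer_instance

-- ===== CLAIM (what is proved, stated in full; the proofs are below) =====
def Claim_equal_find_stop_word_boundary_py : Prop := ∀ (text : String) (max_chars : Int), Dom_find_stop_word_boundary_py text max_chars → Spec_find_stop_word_boundary_py text max_chars (find_stop_word_boundary_py text max_chars)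

-- ===== LEMMAS AND PROOFS =====

-- equations for PySem.Chars.rfind.go
theorem pv_go_zero (s sub : List Char) :
    PySem.Chars.rfind.go s sub 0 = if sub.isPrefixOf s then 0 else -1 := by
  simp [PySem.Chars.rfind.go]

theorem pv_go_succ (s sub : List Char) (j : Nat) :
    PySem.Chars.rfind.go s sub (j+1)
      = if sub.isPrefixOf (s.drop (j+1)) then ((j : Int)+1) else PySem.Chars.rfind.go s sub j := by
  simp [PySem.Chars.rfind.go]

theorem pv_go_le (s sub : List Char) (j : Nat) : PySem.Chars.rfind.go s sub j ≤ (j : Int) := by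
  induction j with
  | zero => rw [pv_go_zero]; split <;> omega
  | succ j ih => rw [pv_go_succ]; split <;> push_cast <;> omega

-- if sub is not a prefix of the tail at j+1, stepping down one level does not change go
theorem pv_go_succ_of_not_prefix (s sub : List Char) (j : Nat)
    (h : ¬ sub <+: s.drop (j+1)) :
    PySem.Chars.rfind.go s sub (j+1) = PySem.Chars.rfind.go s sub j := by
  rw [pv_go_succ, if_neg (by simpa [List.isPrefixOf_iff_prefix] using h)]

-- a word that does not fit in the remaining tail: go steps down
theorem pv_go_drop_short (st : List Char) (w : List Char) (j : Nat)
    (h : j + w.length > st.length) (hj : 0 < j) (hw : 0 < w.length) :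
    PySem.Chars.rfind.go st w j = PySem.Chars.rfind.go st w (j-1) := by
  obtain ⟨j', rfl⟩ : ∃ j', j = j' + 1 := ⟨j - 1, by omega⟩
  simp only [Nat.add_sub_cancel]
  rw [pv_go_succ_of_not_prefix]
  intro hp
  have := hp.length_le
  rw [List.length_drop] at this
  omega

theorem pv_prefix_iff_take (w t : List Char) (hw : w.length = 2) :
    w <+: t ↔ t.take 2 = w := by
  constructor
  · intro h
    have := List.prefix_iff_eq_take.mp h
    rw [hw] at this
    exact this.symm
  · intro h
    exact h ▸ List.take_prefix 2 t

theorem pv_contains_iff (ws : List (List Char)) (t : List Char) (hws : ∀ w ∈ ws, w.length = 2) :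
    ws.contains (t.take 2) = true ↔ ∃ w ∈ ws, w <+: t := by
  simp only [List.contains_iff_exists_mem_beq, beq_iff_eq]
  constructor
  · rintro ⟨w, hw, he⟩
    exact ⟨w, hw, (pv_prefix_iff_take w t (hws w hw)).mpr he⟩
  · rintro ⟨w, hw, he⟩
    exact ⟨w, hw, (pv_prefix_iff_take w t (hws w hw)).mp he⟩

theorem pv_contains_iff_false (ws : List (List Char)) (t : List Char) (hws : ∀ w ∈ ws, w.length = 2)
    (h : ¬ ∃ w ∈ ws, w <+: t) : ws.contains (t.take 2) = false := by
  rw [Bool.eq_false_iff]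
  intro h'
  exact h ((pv_contains_iff ws t hws).mp h')

-- fold-max facts
theorem pv_foldl_max_ge_init {α : Type} (g : α → Int) (ws : List α) (a : Int) :
    a ≤ ws.foldl (fun m w => max m (g w)) a := by
  induction ws generalizing a with
  | nil => simp
  | cons w ws ih => exact le_trans (le_max_left _ _) (ih (max a (g w)))

theorem pv_foldl_max_le {α : Type} (g : α → Int) (ws : List α) (a c : Int)
    (ha : a ≤ c) (h : ∀ w ∈ ws, g w ≤ c) :
    ws.foldl (fun m w => max m (g w)) a ≤ c := by
  induction ws generalizing a with
  | nil => simpa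
  | cons w ws ih =>
    exact ih (max a (g w)) (max_le ha (h w (List.mem_cons_self))) (fun w hw => h w (List.mem_cons_of_mem _ hw))

theorem pv_le_foldl_max {α : Type} (g : α → Int) (ws : List α) :
    ∀ (a : Int) (w : α), w ∈ ws → g w ≤ ws.foldl (fun m w => max m (g w)) a := by
  induction ws with
  | nil => intro a w hw; cases hw
  | cons x ws ih =>
    intro a w hw
    rcases List.mem_cons.mp hw with h | h
    · subst h
      exact le_trans (le_max_right _ _) (pv_foldl_max_ge_init g ws _)
    · exact ih _ w h

theorem pv_foldl_max_congr {α : Type} (g h : α → Int) (ws : List α) (a : Int)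
    (he : ∀ w ∈ ws, g w = h w) :
    ws.foldl (fun m w => max m (g w)) a = ws.foldl (fun m w => max m (h w)) a := by
  induction ws generalizing a with
  | nil => rfl
  | cons w ws ih =>
    simp only [List.foldl_cons, he w (List.mem_cons_self)]
    exact ih _ (fun w hw => he w (List.mem_cons_of_mem _ hw))

-- A's (best_pos, best_stop_len) fold in terms of the max fold, when every stop word has length 2
theorem pv_pairfold {α : Type} (gp : α → Int) (g2 : α → Int) (ws : List α) (acc : Int × Int)
    (h2 : ∀ w ∈ ws, g2 w = 2) :
    ws.foldl (fun b w => if gp w > b.1 then (gp w, g2 w) else b) acc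
      = (ws.foldl (fun m w => max m (gp w)) acc.1,
         if ws.foldl (fun m w => max m (gp w)) acc.1 = acc.1 then acc.2 else 2) := by
  induction ws generalizing acc with
  | nil => simp
  | cons w ws ih =>
    have h2w := h2 w (List.mem_cons_self)
    have h2ws : ∀ w ∈ ws, g2 w = 2 := fun w hw => h2 w (List.mem_cons_of_mem _ hw)
    simp only [List.foldl_cons]
    by_cases h : gp w > acc.1
    · have hmax : max acc.1 (gp w) = gp w := max_eq_right (le_of_lt h)
      rw [if_pos h, h2w, ih (gp w, 2) h2ws]
      have hge := pv_foldl_max_ge_init gp ws (gp w)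
      simp only [hmax, ite_self]
      have hne : ws.foldl (fun m w => max m (gp w)) (gp w) ≠ acc.1 := by omega
      rw [if_neg hne]
    · have hmax : max acc.1 (gp w) = acc.1 := max_eq_left (by omega)
      rw [if_neg h]
      simp only [hmax]
      exact ih acc h2ws

-- abbreviation used only in the proofs: the max of go over the stop words at level j
def pvMaxGo (st : List Char) (j : Nat) : Int :=
  pvStops.foldl (fun m w => max m (PySem.Chars.rfind.go st w j)) (-1)

theorem pv_stops_len2 : ∀ w ∈ pvStops, w.length = 2 := by decide

theorem pv_maxGo_of_exists (st : List Char) (j : Nat) (c : Int) (hc : -1 ≤ c)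
    (hub : ∀ w ∈ pvStops, PySem.Chars.rfind.go st w j ≤ c)
    (hex : ∃ w ∈ pvStops, PySem.Chars.rfind.go st w j = c) :
    pvMaxGo st j = c := by
  obtain ⟨w, hw, he⟩ := hex
  apply le_antisymm
  · exact pv_foldl_max_le _ _ _ _ hc hub
  · have h2 := pv_le_foldl_max (fun w => PySem.Chars.rfind.go st w j) pvStops (-1) w hw
    unfold pvMaxGo
    calc c = PySem.Chars.rfind.go st w j := he.symm
      _ ≤ _ := h2

theorem pv_maxGo_congr (st : List Char) (j k : Nat)
    (h : ∀ w ∈ pvStops, PySem.Chars.rfind.go st w j = PySem.Chars.rfind.go st w k) :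
    pvMaxGo st j = pvMaxGo st k := by
  unfold pvMaxGo
  exact pv_foldl_max_congr _ _ _ _ h

-- B's stop-word scan agrees with the max of go at the top index scanned
theorem pv_scanStop_eq (st : List Char) :
    ∀ j, j + 1 ≤ st.length →
      pvScanStop st (j+1) = (if pvMaxGo st j = -1 then none else some (pvMaxGo st j + 2)) := by
  intro j
  induction j with
  | zero =>
    intro _
    have hsl : PySem.List.slice st (some ((0:Nat) : Int)) (some (((0:Nat) : Int) + 2)) = st.take 2 := by
      have := PySem.List.slice_natCast_add st 0 2
      simpa using this
    rw [pvScanStop]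
    push_cast at hsl ⊢
    rw [hsl]
    by_cases h : ∃ w ∈ pvStops, w <+: st
    · rw [if_pos ((pv_contains_iff _ _ pv_stops_len2).mpr h)]
      obtain ⟨w, hw, hpre⟩ := h
      have h1 : pvMaxGo st 0 = 0 := by
        apply pv_maxGo_of_exists st 0 0 (by omega)
        · intro w _
          rw [pv_go_zero]; split <;> omega
        · exact ⟨w, hw, by rw [pv_go_zero, if_pos (List.isPrefixOf_iff_prefix.mpr hpre)]⟩
      rw [h1]
      norm_num
    · rw [pv_contains_iff_false _ _ pv_stops_len2 h, if_neg (by simp)]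
      have h1 : pvMaxGo st 0 = -1 := by
        apply pv_maxGo_of_exists st 0 (-1) le_rfl
        · intro w hw
          rw [pv_go_zero, if_neg (fun hp => h ⟨w, hw, List.isPrefixOf_iff_prefix.mp hp⟩)]
        · exact ⟨".\n".toList, by decide, by
            rw [pv_go_zero, if_neg (fun hp => h ⟨".\n".toList, by decide, List.isPrefixOf_iff_prefix.mp hp⟩)]⟩
      rw [h1, if_pos rfl]
      rfl
  | succ j ih =>
    intro hle
    have hsl : PySem.List.slice st (some ((j+1 : Nat) : Int)) (some (((j+1 : Nat) : Int) + 2)) = (st.drop (j+1)).take 2 := by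
      have := PySem.List.slice_natCast_add st (j+1) 2
      push_cast at this ⊢
      simpa using this
    rw [pvScanStop]
    push_cast at hsl ⊢
    rw [hsl]
    by_cases h : ∃ w ∈ pvStops, w <+: st.drop (j+1)
    · rw [if_pos ((pv_contains_iff _ _ pv_stops_len2).mpr h)]
      obtain ⟨w, hw, hpre⟩ := h
      have h1 : pvMaxGo st (j+1) = (j : Int) + 1 := by
        apply pv_maxGo_of_exists st (j+1) ((j : Int) + 1) (by omega)
        · intro w _
          have := pv_go_le st w (j+1)
          push_cast at this
          omega
        · refine ⟨w, hw, ?_⟩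
          rw [pv_go_succ, if_pos (List.isPrefixOf_iff_prefix.mpr hpre)]
      rw [h1, if_neg (by omega)]
    · rw [pv_contains_iff_false _ _ pv_stops_len2 h]
      have h1 : pvMaxGo st (j+1) = pvMaxGo st j := by
        apply pv_maxGo_congr
        intro w hw
        exact pv_go_succ_of_not_prefix st w j (fun hp => h ⟨w, hw, hp⟩)
      rw [if_neg (by simp), h1]
      exact ih (by omega)

theorem pv_singleton_prefix_iff (c : Char) (t : List Char) : [c] <+: t ↔ t[0]? = some c := by
  cases t with
  | nil => simp
  | cons x xs =>
    simp only [List.getElem?_cons_zero, Option.some.injEq]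
    constructor
    · rintro ⟨r, hr⟩; cases hr; rfl
    · rintro rfl; exact ⟨xs, rfl⟩

-- B's space scan agrees with go for the one-character word " "
theorem pv_scanSpace_eq (st : List Char) :
    ∀ j, j + 1 ≤ st.length →
      pvScanSpace st (j+1)
        = (if PySem.Chars.rfind.go st [' '] j = -1 then none
           else some (PySem.Chars.rfind.go st [' '] j + 1)) := by
  intro j
  induction j with
  | zero =>
    intro _
    rw [pvScanSpace]
    have hg : PySem.List.pyGet? st ((0:Nat) : Int) = st[0]? := PySem.List.pyGet?_natCast st 0
    push_cast at hg ⊢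
    rw [hg]
    by_cases h : st[0]? = some ' '
    · have hgo : PySem.Chars.rfind.go st [' '] 0 = 0 := by
        rw [pv_go_zero,
          if_pos (List.isPrefixOf_iff_prefix.mpr ((pv_singleton_prefix_iff ' ' st).mpr h))]
      rw [hgo]
      simp [h]
    · have hgo : PySem.Chars.rfind.go st [' '] 0 = -1 := by
        rw [pv_go_zero, if_neg ?_]
        intro h'
        exact h ((pv_singleton_prefix_iff ' ' st).mp (List.isPrefixOf_iff_prefix.mp h'))
      have hb : (st[0]? == some ' ') = false := by
        rw [Bool.eq_false_iff]; intro h'; exact h (beq_iff_eq.mp h')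
      rw [hgo, hb, if_neg (by simp), if_pos rfl]
      rfl
  | succ j ih =>
    intro hle
    rw [pvScanSpace]
    have hg : PySem.List.pyGet? st ((j+1 : Nat) : Int) = st[j+1]? := PySem.List.pyGet?_natCast st (j+1)
    rw [hg]
    by_cases h : st[j+1]? = some ' '
    · have hp : [' '] <+: st.drop (j+1) := by
        apply (pv_singleton_prefix_iff ' ' _).mpr
        rw [List.getElem?_drop]
        simpa using h
      have hgo : PySem.Chars.rfind.go st [' '] (j+1) = (j : Int) + 1 := by
        rw [pv_go_succ, if_pos (List.isPrefixOf_iff_prefix.mpr hp)]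
      have hb : (st[j+1]? == some ' ') = true := by simp [h]
      rw [hgo, hb, if_pos rfl, if_neg (by omega)]
      push_cast
      ring_nf
    · have hp : ¬ [' '] <+: st.drop (j+1) := by
        intro h'
        apply h
        have := (pv_singleton_prefix_iff ' ' _).mp h'
        rw [List.getElem?_drop] at this
        simpa using this
      have hgo : PySem.Chars.rfind.go st [' '] (j+1) = PySem.Chars.rfind.go st [' '] j :=
        pv_go_succ_of_not_prefix st [' '] j hp
      have hb : (st[j+1]? == some ' ') = false := by
        rw [Bool.eq_false_iff]; intro h'; exact h (beq_iff_eq.mp h')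
      rw [hgo, hb, if_neg (by simp)]
      exact ih (by omega)

-- ===== VERDICT (by name: the statement is the Claim_ definition above) =====
theorem find_stop_word_boundary_py_spec : Claim_equal_find_stop_word_boundary_py := by
  intro text max_chars _
  unfold Spec_find_stop_word_boundary_py
  simp only [find_stop_word_boundary_py, find_stop_word_boundary_py_alt]
  by_cases h0 : text = "" ∨ max_chars ≤ 0
  · rw [if_pos h0, if_pos h0]
  rw [if_neg h0, if_neg h0]
  by_cases h1 : PySem.Str.len text ≤ max_chars
  · rw [if_pos h1, if_pos h1]
  rw [if_neg h1, if_neg h1]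
  set s := PySem.Str.slice text none (some max_chars) with hs
  set st := s.toList with hst
  have hmc : 0 < max_chars := by rcases not_or.mp h0 with ⟨_, h⟩; omega
  have hlen : st.length = max_chars.toNat := by
    rw [hst, hs, PySem.Str.toList_slice]
    simp only [PySem.Chars.slice_eq_listSlice]
    rw [PySem.List.slice_to _ (le_of_lt hmc), List.length_take]
    have := PySem.Str.len_eq text
    omega
  have hpos : 1 ≤ st.length := by omega
  -- A's best fold as (maxpos, stop_len)
  rw [pv_pairfold (fun w : String => PySem.Str.rfind s w)
      (fun w : String => PySem.Str.len w)
      [".\n", "!\n", "?\n", ". ", "! ", "? ", "\n\n", "; "] (-1, 0) (by decide)]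
  -- A's max fold is pvMaxGo at full length
  have hmap : ([".\n", "!\n", "?\n", ". ", "! ", "? ", "\n\n", "; "] : List String).foldl
      (fun m w => max m (PySem.Str.rfind s w)) ((-1 : Int), (0 : Int)).1
      = pvMaxGo st st.length := by
    unfold pvMaxGo
    have hmapeq : pvStops = ([".\n", "!\n", "?\n", ". ", "! ", "? ", "\n\n", "; "] : List String).map String.toList := by decide
    rw [hmapeq, List.foldl_map]
    exact pv_foldl_max_congr _ _ _ _ (fun w _ => by rw [PySem.Str.rfind_eq]; rfl)
  rw [hmap]
  -- A's rfind for " " is go at full length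
  have hsp : PySem.Str.rfind s " " = PySem.Chars.rfind.go st [' '] st.length := by
    rw [PySem.Str.rfind_eq]; rfl
  -- B's stop scan equals pvMaxGo at full length
  have hstop : pvScanStop st (st.length - 1)
      = (if pvMaxGo st st.length = -1 then none else some (pvMaxGo st st.length + 2)) := by
    by_cases hn2 : 2 ≤ st.length
    · have hM : pvMaxGo st st.length = pvMaxGo st (st.length - 2) := by
        apply pv_maxGo_congr
        intro w hw
        have hw2 := pv_stops_len2 w hw
        have e1 := pv_go_drop_short st w st.length (by omega) (by omega) (by omega)
        have e2 := pv_go_drop_short st w (st.length - 1) (by omega) (by omega) (by omega)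
        rw [e1, e2]
        have : st.length - 1 - 1 = st.length - 2 := by omega
        rw [this]
      have hrw : st.length - 1 = (st.length - 2) + 1 := by omega
      rw [hrw, pv_scanStop_eq st (st.length - 2) (by omega), hM]
    · have hn1 : st.length = 1 := by omega
      have hM : pvMaxGo st st.length = -1 := by
        apply pv_maxGo_of_exists st st.length (-1) le_rfl
        · intro w hw
          have hw2 := pv_stops_len2 w hw
          have e1 := pv_go_drop_short st w st.length (by omega) (by omega) (by omega)
          rw [e1, hn1]
          simp only [Nat.sub_self]
          rw [pv_go_zero, if_neg ?_]
          intro hp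
          have := (List.isPrefixOf_iff_prefix.mp hp).length_le
          omega
        · refine ⟨".\n".toList, by decide, ?_⟩
          have e1 := pv_go_drop_short st ".\n".toList st.length (by simp) (by omega) (by simp)
          rw [e1, hn1]
          simp only [Nat.sub_self]
          rw [pv_go_zero, if_neg ?_]
          intro hp
          have := (List.isPrefixOf_iff_prefix.mp hp).length_le
          simp at this
          omega
      rw [hM, if_pos rfl, hn1]
      rfl
  -- B's space scan equals go at full length
  have hspace : pvScanSpace st st.length
      = (if PySem.Chars.rfind.go st [' '] st.length = -1 then none
         else some (PySem.Chars.rfind.go st [' '] st.length + 1)) := by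
    have hG : PySem.Chars.rfind.go st [' '] st.length
        = PySem.Chars.rfind.go st [' '] (st.length - 1) := by
      exact pv_go_drop_short st [' '] st.length (by simp) (by omega) (by simp)
    have hrw : st.length = (st.length - 1) + 1 := by omega
    rw [hG, hrw, pv_scanSpace_eq st (st.length - 1) (by omega)]
    have : st.length - 1 + 1 - 1 = st.length - 1 := by omega
    rw [this]
  rw [hstop, hspace, hsp]
  by_cases hM : pvMaxGo st st.length = -1
  · rw [if_pos hM, hM]
    simp only [ne_eq, not_true_eq_false, if_false, reduceIte]
    by_cases hG : PySem.Chars.rfind.go st [' '] st.length = -1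
    · rw [if_pos hG, if_neg (by simp [hG])]
    · rw [if_neg hG, if_pos hG]
  · rw [if_neg hM]
    have hMne : pvMaxGo st st.length ≠ -1 := hM
    simp only [ne_eq, hMne, not_false_eq_true, if_true, reduceIte]
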